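-- pv_equiv track=rewrite | github.com/wojkos9/cryptography | lab2/fips.py | fips3
-- ===== SOURCE A (Python) =====
-- def fips3(k):
--     s = 0
--     max_0 = 0
--     max_1 = 0
--     ones = k[0] & 0x80
--     for b in k:
--         t = 0x80
--         while t:
--             bset = b & t
--             if ones:
--                 if bset:
--                     s += 1
--                 else:
--                     max_1 = max(s, max_1)
--                     ones = False
--                     s = 1
--             else:
--                 if bset:
--                     max_0 = max(s, max_0)
--                     ones = True
--                     s = 1
--                 else:
--                     s += 1
--             t >>= 1
--     if ones:
--         max_1 = max(s, max_1)
--     else: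
--         max_0 = max(s, max_0)
--
--     return max_0 < 26 and max_1 < 26
-- ===== SOURCE B (Python) =====
-- def fips3(k):
--     bits = [1 if b & (1 << (7 - i)) else 0 for b in k for i in range(8)]
--     runs = []  # run-length encoding: [bit, length] per maximal run
--     for x in bits:
--         if runs and runs[-1][0] == x:
--             runs[-1][1] += 1
--         else:
--             runs.append([x, 1])
--     max_0 = max([n for v, n in runs if v == 0], default=0)
--     max_1 = max([n for v, n in runs if v == 1], default=0)
--     return max_0 < 26 and max_1 < 26
-- ===== Notes on version B (the rewrite author's own statement) =====
-- stated objective: alternative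
-- what changed: Replaces A's per-bit transition state machine (ones/s flags updated bit by bit inside nested byte/mask loops, with a final flush) by building the flat bit list, run-length encoding it into (bit, length) runs, and reducing each key's run lengths with max.
import Mathlib
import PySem

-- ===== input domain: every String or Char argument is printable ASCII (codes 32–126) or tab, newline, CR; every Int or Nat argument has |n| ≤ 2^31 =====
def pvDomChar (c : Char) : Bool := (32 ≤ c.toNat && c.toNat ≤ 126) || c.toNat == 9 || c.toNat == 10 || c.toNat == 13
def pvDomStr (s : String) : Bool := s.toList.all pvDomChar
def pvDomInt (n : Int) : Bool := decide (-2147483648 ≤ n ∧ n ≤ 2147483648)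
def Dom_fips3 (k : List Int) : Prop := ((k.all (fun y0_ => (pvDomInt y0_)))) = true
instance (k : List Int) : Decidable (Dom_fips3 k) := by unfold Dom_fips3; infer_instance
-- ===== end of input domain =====

-- B replaces A's per-bit transition state machine by building the flat bit list,
-- run-length encoding it, and reducing each key's run lengths with max (objective: alternative decomposition).
-- A raises IndexError on k = [] (it evaluates k[0] up front); Pre_ excludes exactly that input.

-- ===== PORT A =====
-- inner 'while t:' loop of A; state = (ones, s, max_0, max_1)
def fips3While (b : Int) (t : Nat) (st : Bool × Int × Int × Int) : Bool × Int × Int × Int :=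
  if t = 0 then st
  else
    let (ones, s, m0, m1) := st
    let bset := PySem.Int.band b (t : Int)
    fips3While b (t / 2)
      (if ones then
         if bset ≠ 0 then (ones, s + 1, m0, m1) else (false, 1, m0, max s m1)
       else
         if bset ≠ 0 then (true, 1, max s m0, m1) else (ones, s + 1, m0, m1))
  termination_by t
  decreasing_by omega

def fips3 (k : List Int) : Bool :=
  match k with
  | [] => false  -- 'ones = k[0] & 0x80' raises IndexError here; excluded by Pre_fips3
  | k0 :: _ =>
    let ones0 : Bool := decide (PySem.Int.band k0 128 ≠ 0)  -- truthiness of the int k[0] & 0x80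
    match k.foldl (fun st b => fips3While b 128 st) (ones0, 0, 0, 0) with
    | (ones, s, m0, m1) =>
      if ones then decide (m0 < 26) && decide (max s m1 < 26)
      else decide (max s m0 < 26) && decide (m1 < 26)

-- ===== PORT B =====
-- the comprehension '[1 if b & (1 << (7 - i)) else 0 for b in k for i in range(8)]'
def fips3Bits (k : List Int) : List Int :=
  k.flatMap (fun b =>
    (PySem.List.pyRange 0 8 1).map
      (fun i => if PySem.Int.band b ((1 : Int) <<< (7 - i).toNat) ≠ 0 then (1 : Int) else 0))
      -- i ∈ range(8) so 7 - i ≥ 0 and '.toNat' is exact here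

-- one step of B's run-length-encoding loop ('runs[-1][1] += 1' becomes rebuilding the last cell)
def fips3RunStep (runs : List (Int × Int)) (x : Int) : List (Int × Int) :=
  match runs.getLast? with
  | some (v, n) => if v == x then runs.dropLast ++ [(v, n + 1)] else runs ++ [(x, 1)]
  | none => [(x, 1)]

-- max([n for v, n in runs if v == u], default=0)
def fips3MaxKey (u : Int) (runs : List (Int × Int)) : Int :=
  (PySem.List.max? ((runs.filter (fun p => p.1 == u)).map (·.2)) (fun y => y)).getD 0

def fips3_alt (k : List Int) : Bool :=
  let runs := (fips3Bits k).foldl fips3RunStep []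
  decide (fips3MaxKey 0 runs < 26) && decide (fips3MaxKey 1 runs < 26)

-- ===== PRECONDITION & SPEC =====
-- A evaluates k[0] up front, so it raises IndexError on the empty list; Pre_ excludes exactly that input.
def Pre_fips3 (k : List Int) : Prop := k ≠ []
instance (k : List Int) : Decidable (Pre_fips3 k) := by unfold Pre_fips3; infer_instance
def pvWitness_fips3 : List Int := [0]

def Spec_fips3 (k : List Int) (out : Bool) : Prop := out = fips3_alt k
instance (k : List Int) (out : Bool) : Decidable (Spec_fips3 k out) := by unfold Spec_fips3; infer_instance

-- ===== CLAIM (what is proved, stated in full; the proofs are below) =====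
def Claim_equal_fips3 : Prop := ∀ (k : List Int), Dom_fips3 k → Pre_fips3 k → Spec_fips3 k (fips3 k)

-- ===== LEMMAS AND PROOFS =====

-- A's per-bit transition, abstracted over the 0/1 bit value x
def pvBitStep (st : Bool × Int × Int × Int) (x : Int) : Bool × Int × Int × Int :=
  let (ones, s, m0, m1) := st
  if ones then
    if x ≠ 0 then (ones, s + 1, m0, m1) else (false, 1, m0, max s m1)
  else
    if x ≠ 0 then (true, 1, max s m0, m1) else (ones, s + 1, m0, m1)

-- the 8 bits of one byte, as B builds them
def pvByteBits (b : Int) : List Int :=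
  (PySem.List.pyRange 0 8 1).map
    (fun i => if PySem.Int.band b ((1 : Int) <<< (7 - i).toNat) ≠ 0 then (1 : Int) else 0)

def pvInd (b t : Int) : Int := if PySem.Int.band b t ≠ 0 then 1 else 0

lemma pvInd01 (b t : Int) : pvInd b t = 0 ∨ pvInd b t = 1 := by
  unfold pvInd; split <;> simp

lemma pvByteBits_eq (b : Int) :
    pvByteBits b = [pvInd b 128, pvInd b 64, pvInd b 32, pvInd b 16,
                    pvInd b 8, pvInd b 4, pvInd b 2, pvInd b 1] := by
  simp only [pvByteBits, show PySem.List.pyRange 0 8 1 = [0,1,2,3,4,5,6,7] by decide, List.map]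
  norm_num [pvInd, show ((1:Int) <<< 7) = 128 by decide, show ((1:Int) <<< 6) = 64 by decide,
    show ((1:Int) <<< 5) = 32 by decide, show ((1:Int) <<< 4) = 16 by decide,
    show ((1:Int) <<< 3) = 8 by decide, show ((1:Int) <<< 2) = 4 by decide,
    show ((1:Int) <<< 1) = 2 by decide, show ((1:Int) <<< 0) = 1 by decide]

lemma pvWhile_step (b : Int) (t : Nat) (h : ¬ t = 0) (st : Bool × Int × Int × Int) :
    fips3While b t st = fips3While b (t / 2) (pvBitStep st (pvInd b (t : Int))) := by
  obtain ⟨o, s, m0, m1⟩ := st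
  rw [fips3While]
  simp only [if_neg h]
  congr 1
  by_cases hb : PySem.Int.band b (t : Int) = 0 <;> simp [pvBitStep, pvInd, hb]

lemma pvWhile_eq (b : Int) (st : Bool × Int × Int × Int) :
    fips3While b 128 st = List.foldl pvBitStep st (pvByteBits b) := by
  rw [pvByteBits_eq,
    pvWhile_step b 128 (by norm_num), pvWhile_step b 64 (by norm_num),
    pvWhile_step b 32 (by norm_num), pvWhile_step b 16 (by norm_num),
    pvWhile_step b 8 (by norm_num), pvWhile_step b 4 (by norm_num),
    pvWhile_step b 2 (by norm_num), pvWhile_step b 1 (by norm_num)]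
  norm_num [List.foldl]
  rw [fips3While]
  simp

lemma pvBits_cons (b : Int) (kt : List Int) :
    fips3Bits (b :: kt) = pvByteBits b ++ fips3Bits kt := rfl

lemma pvFold_eq (k : List Int) (st : Bool × Int × Int × Int) :
    k.foldl (fun st b => fips3While b 128 st) st = List.foldl pvBitStep st (fips3Bits k) := by
  induction k generalizing st with
  | nil => rfl
  | cons b kt ih =>
    rw [List.foldl_cons, ih, pvBits_cons, List.foldl_append, pvWhile_eq]

lemma pvBits_mem (k : List Int) : ∀ x ∈ fips3Bits k, x = 0 ∨ x = 1 := by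
  intro x hx
  unfold fips3Bits at hx
  simp only [List.mem_flatMap, List.mem_map] at hx
  obtain ⟨b, _, i, _, rfl⟩ := hx
  split <;> simp

lemma pvMaxD_append (l : List Int) (n : Int) (hn : 0 ≤ n) :
    (PySem.List.max? (l ++ [n]) (fun y => y)).getD 0
      = max ((PySem.List.max? l (fun y => y)).getD 0) n := by
  cases l with
  | nil =>
    have h1 : PySem.List.max? (([] : List Int) ++ [n]) (fun y => y) = some n := rfl
    have h2 : PySem.List.max? ([] : List Int) (fun y => y) = none := rfl
    rw [h1, h2]
    simp
    omega
  | cons x t =>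
    have h1 : x :: t ++ [n] = x :: (t ++ [n]) := rfl
    rw [h1, PySem.List.max?_id_cons, PySem.List.max?_id_cons, List.foldl_append]
    simp

lemma pvMaxKey_append (u v n : Int) (rs : List (Int × Int)) (hn : 0 ≤ n) :
    fips3MaxKey u (rs ++ [(v, n)])
      = if v = u then max (fips3MaxKey u rs) n else fips3MaxKey u rs := by
  unfold fips3MaxKey
  rw [List.filter_append, List.map_append]
  by_cases h : v = u
  · have h2 : (([(v, n)] : List (Int × Int)).filter (fun p => p.1 == u)) = [(v, n)] := by
      simp [h]
    rw [h2]
    simp only [List.map]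
    rw [pvMaxD_append _ n hn]
    simp [h]
  · have h2 : (([(v, n)] : List (Int × Int)).filter (fun p => p.1 == u)) = [] := by
      simp [h]
    rw [h2]
    simp [h]

-- A's final answer from its loop state
def pvFinAns (st : Bool × Int × Int × Int) : Bool :=
  match st with
  | (ones, s, m0, m1) =>
    if ones then decide (m0 < 26) && decide (max s m1 < 26)
    else decide (max s m0 < 26) && decide (m1 < 26)

def pvAnsB (runs : List (Int × Int)) : Bool :=
  decide (fips3MaxKey 0 runs < 26) && decide (fips3MaxKey 1 runs < 26)

lemma pvCore (bits : List Int) : ∀ (v n : Int) (rs : List (Int × Int)),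
    (∀ x ∈ bits, x = 0 ∨ x = 1) → (v = 0 ∨ v = 1) → 1 ≤ n →
    pvFinAns (List.foldl pvBitStep (decide (v ≠ 0), n, fips3MaxKey 0 rs, fips3MaxKey 1 rs) bits)
      = pvAnsB (List.foldl fips3RunStep (rs ++ [(v, n)]) bits) := by
  induction bits with
  | nil =>
    intro v n rs _ hv hn
    simp only [List.foldl]
    rcases hv with rfl | rfl
    · simp [pvFinAns, pvAnsB, pvMaxKey_append _ _ _ _ (by omega : (0:Int) ≤ n), max_comm]
    · simp [pvFinAns, pvAnsB, pvMaxKey_append _ _ _ _ (by omega : (0:Int) ≤ n), max_comm]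
  | cons x tl ih =>
    intro v n rs hmem hv hn
    have hx := hmem x (List.mem_cons_self ..)
    have hmem' : ∀ y ∈ tl, y = 0 ∨ y = 1 := fun y hy => hmem y (List.mem_cons_of_mem _ hy)
    simp only [List.foldl_cons]
    have hlast : (rs ++ [(v, n)]).getLast? = some (v, n) := by simp
    by_cases hxv : x = v
    · -- same run: extend
      have hstepA : pvBitStep (decide (v ≠ 0), n, fips3MaxKey 0 rs, fips3MaxKey 1 rs) x
          = (decide (v ≠ 0), n + 1, fips3MaxKey 0 rs, fips3MaxKey 1 rs) := by
        subst hxv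
        rcases hv with rfl | rfl <;> simp [pvBitStep]
      have hstepB : fips3RunStep (rs ++ [(v, n)]) x = rs ++ [(v, n + 1)] := by
        rw [fips3RunStep, hlast]
        simp [hxv]
      rw [hstepA, hstepB]
      exact ih v (n + 1) rs hmem' hv (by omega)
    · -- transition: flush current run, start a new one
      have hstepB : fips3RunStep (rs ++ [(v, n)]) x = (rs ++ [(v, n)]) ++ [(x, 1)] := by
        rw [fips3RunStep, hlast]
        have : (v == x) = false := by simp [Ne.symm hxv]
        simp [this]
      have hstepA : pvBitStep (decide (v ≠ 0), n, fips3MaxKey 0 rs, fips3MaxKey 1 rs) x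
          = (decide (x ≠ 0), 1, fips3MaxKey 0 (rs ++ [(v, n)]), fips3MaxKey 1 (rs ++ [(v, n)])) := by
        rw [pvMaxKey_append _ _ _ _ (by omega : (0:Int) ≤ n),
            pvMaxKey_append _ _ _ _ (by omega : (0:Int) ≤ n)]
        rcases hv with rfl | rfl <;> rcases hx with rfl | rfl <;>
          simp_all [pvBitStep] <;> omega
      rw [hstepA, hstepB]
      exact ih x 1 (rs ++ [(v, n)]) hmem' hx (by omega)

-- ===== VERDICT (by name: the statement is the Claim_ definition above) =====
theorem fips3_spec : Claim_equal_fips3 := by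
  intro k _ hpre
  unfold Spec_fips3
  match k with
  | [] => exact absurd rfl hpre
  | k0 :: kt =>
    have hA : fips3 (k0 :: kt)
        = pvFinAns ((k0 :: kt).foldl (fun st b => fips3While b 128 st)
            (decide (PySem.Int.band k0 128 ≠ 0), 0, 0, 0)) := by
      rcases hfold : (k0 :: kt).foldl (fun st b => fips3While b 128 st)
          (decide (PySem.Int.band k0 128 ≠ 0), 0, 0, 0) with ⟨o, s, m0, m1⟩
      simp only [fips3]
      rw [hfold, pvFinAns]
    have hB : fips3_alt (k0 :: kt) = pvAnsB ((fips3Bits (k0 :: kt)).foldl fips3RunStep []) := rfl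
    rw [hA, hB, pvFold_eq]
    have hbits : fips3Bits (k0 :: kt) = pvInd k0 128 ::
        ([pvInd k0 64, pvInd k0 32, pvInd k0 16, pvInd k0 8, pvInd k0 4, pvInd k0 2, pvInd k0 1]
          ++ fips3Bits kt) := by
      rw [pvBits_cons, pvByteBits_eq]; rfl
    rw [hbits]
    simp only [List.foldl_cons]
    have hfirstA : pvBitStep (decide (PySem.Int.band k0 128 ≠ 0), 0, 0, 0) (pvInd k0 128)
        = (decide (pvInd k0 128 ≠ 0), 1, fips3MaxKey 0 [], fips3MaxKey 1 []) := by
      by_cases hb : PySem.Int.band k0 128 = 0 <;>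
        simp [pvBitStep, pvInd, hb, fips3MaxKey, PySem.List.max?]
    have hfirstB : fips3RunStep [] (pvInd k0 128) = [] ++ [(pvInd k0 128, 1)] := rfl
    rw [hfirstA, hfirstB]
    refine pvCore _ (pvInd k0 128) 1 [] ?_ (pvInd01 k0 128) le_rfl
    intro y hy
    rcases List.mem_append.mp hy with h | h
    · simp only [List.mem_cons, List.not_mem_nil, or_false] at h
      rcases h with rfl|rfl|rfl|rfl|rfl|rfl|rfl <;> exact pvInd01 k0 _
    · exact pvBits_mem kt y h
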